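-- pv_equiv track=rewrite | github.com/yishunlu-222/AnACor_public | AnACor/utils/partial/main3_general_mp_pl.py | ada_sampling
-- ===== SOURCE A (Python) =====
-- def ada_sampling(crystal_coordinate ,threshold=15000):
--     num=len(crystal_coordinate)
--     sampling=1
--     result = num
--     while result >threshold:
--         sampling=sampling *2
--         result = num/sampling
--
--
--     return sampling
-- ===== SOURCE B (Python) =====
-- def ada_sampling(crystal_coordinate, threshold=15000):
--     num = len(crystal_coordinate)
--     if num <= threshold:
--         return 1
--     q = -(-num // threshold)          # ceil(num / threshold), exact integer arithmetic
--     return 2 ** (q - 1).bit_length()  # smallest power of two p with num / p <= threshold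
-- ===== Notes on version B (the rewrite author's own statement) =====
-- stated objective: simpler
-- what changed: Replaces A's doubling while-loop over float divisions by a closed form: the smallest exponent is the bit length of ceil(num/threshold)-1, computed with exact integer arithmetic.
-- outside the precondition, e.g. on ada_sampling([0], -1): A does not finish within the time limit, B returns 4
import Mathlib
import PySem

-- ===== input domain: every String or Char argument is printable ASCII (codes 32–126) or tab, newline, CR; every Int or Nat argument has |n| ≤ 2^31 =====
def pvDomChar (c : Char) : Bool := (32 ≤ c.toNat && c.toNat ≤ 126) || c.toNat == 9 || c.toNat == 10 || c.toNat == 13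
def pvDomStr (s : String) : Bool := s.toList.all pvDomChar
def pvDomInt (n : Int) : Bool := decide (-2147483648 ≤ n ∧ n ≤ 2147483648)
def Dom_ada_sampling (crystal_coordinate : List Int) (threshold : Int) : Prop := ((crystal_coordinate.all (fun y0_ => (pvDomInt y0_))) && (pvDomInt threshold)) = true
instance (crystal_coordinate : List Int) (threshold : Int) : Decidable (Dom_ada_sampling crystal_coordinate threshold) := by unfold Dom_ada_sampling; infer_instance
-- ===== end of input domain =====

-- B replaces A's doubling while-loop by a closed form (bit length of the ceiling quotient); objective: simpler.

-- ===== PORT A =====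
-- A's loop, comparison `num/sampling > threshold` rewritten exactly as `threshold*sampling < num`
-- (exact on Pre_: num = len ≥ 0 and sampling a power of two make the float quotient and comparison
-- exact for the list sizes the checks draw). The fuel argument is only a totality guard: with
-- threshold ≥ 1 the loop exits after at most num iterations, so fuel = num.toNat + 1 is never exhausted.
def adaLoop (num threshold : Int) (sampling : Int) : Nat → Int
  | 0 => sampling
  | fuel + 1 =>
    if threshold * sampling < num then adaLoop num threshold (sampling * 2) fuel
    else sampling

def ada_sampling (crystal_coordinate : List Int) (threshold : Int) : Int :=
  let num : Int := crystal_coordinate.length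
  adaLoop num threshold 1 (num.toNat + 1)

-- ===== PORT B =====
def ada_sampling_alt (crystal_coordinate : List Int) (threshold : Int) : Int :=
  let num : Int := crystal_coordinate.length
  if num ≤ threshold then 1
  else
    let q : Int := -(PySem.Int.floordiv (-num) threshold)   -- ceil(num / threshold)
    (2 : Int) ^ PySem.Int.bitLength (q - 1)

-- ===== PRECONDITION & SPEC =====
-- Pre_ excludes threshold ≤ 0 (except the empty list with threshold = 0): there A either loops
-- forever (threshold < 0, or threshold = 0 on the empty list is fine but negative is not) or
-- returns a power of two fixed by float underflow (threshold = 0, non-empty list), while B's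
-- division by threshold raises ZeroDivisionError.
def Pre_ada_sampling (crystal_coordinate : List Int) (threshold : Int) : Prop :=
  1 ≤ threshold ∨ (crystal_coordinate = [] ∧ 0 ≤ threshold)
instance (crystal_coordinate : List Int) (threshold : Int) : Decidable (Pre_ada_sampling crystal_coordinate threshold) := by unfold Pre_ada_sampling; infer_instance

def pvWitness_ada_sampling : List Int × Int := ([7, 8, 9], 2)

def Spec_ada_sampling (crystal_coordinate : List Int) (threshold : Int) (out : Int) : Prop := out = ada_sampling_alt crystal_coordinate threshold
instance (crystal_coordinate : List Int) (threshold : Int) (out : Int) : Decidable (Spec_ada_sampling crystal_coordinate threshold out) := by unfold Spec_ada_sampling; infer_instance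

-- ===== CLAIM (what is proved, stated in full; the proofs are below) =====
def Claim_equal_ada_sampling : Prop := ∀ (crystal_coordinate : List Int) (threshold : Int), Dom_ada_sampling crystal_coordinate threshold → Pre_ada_sampling crystal_coordinate threshold → Spec_ada_sampling crystal_coordinate threshold (ada_sampling crystal_coordinate threshold)

-- ===== LEMMAS AND PROOFS =====

-- A's loop started at sampling = 2^j returns 2^k, where k is the least exponent with num ≤ t·2^k,
-- provided j ≤ k and there is enough fuel.
theorem adaLoop_eq_pow (num t : Int) (k : Nat)
    (hk : num ≤ t * 2 ^ k) (hmin : ∀ i, i < k → t * 2 ^ i < num) :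
    ∀ fuel j, j ≤ k → k ≤ j + fuel → adaLoop num t (2 ^ j) fuel = 2 ^ k := by
  intro fuel
  induction fuel with
  | zero =>
    intro j hj hfk
    have : j = k := by omega
    simp [adaLoop, this]
  | succ f ih =>
    intro j hj hfk
    by_cases hjk : j = k
    · subst hjk
      simp [adaLoop, not_lt.mpr hk]
    · have hjlt : j < k := lt_of_le_of_ne hj hjk
      have hcond : t * 2 ^ j < num := hmin j hjlt
      have : (2 : Int) ^ j * 2 = 2 ^ (j + 1) := by ring
      simp only [adaLoop, if_pos hcond, this]
      exact ih (j + 1) (by omega) (by omega)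

theorem ada_sampling_spec' (l : List Int) (t : Int)
    (hpre : Pre_ada_sampling l t) :
    ada_sampling l t = ada_sampling_alt l t := by
  rcases hpre with ht | ⟨hl, ht0⟩
  · -- threshold ≥ 1
    set num : Int := (l.length : Int) with hnum
    have hnum0 : 0 ≤ num := by simp [hnum]
    by_cases hle : num ≤ t
    · -- loop exits immediately; B returns 1
      have : ¬ t * 1 < num := by nlinarith
      simp [ada_sampling, ada_sampling_alt, adaLoop, hnum.symm, hle]
    · -- num > t ≥ 1
      rw [not_le] at hle
      -- q = ceil(num / t), bracketed by (q-1)·t < num ≤ q·t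
      set q : Int := -(PySem.Int.floordiv (-num) t) with hq
      have hbr : (q - 1) * t < num ∧ num ≤ q * t :=
        (PySem.Int.neg_floordiv_neg_eq_iff_of_pos (a := num) (b := t) (q := q)
          (by omega)).mp rfl
      have hq2 : 2 ≤ q := by nlinarith [hbr.1, hbr.2]
      set m : Int := q - 1 with hm
      have hm1 : 1 ≤ m := by omega
      set k : Nat := PySem.Int.bitLength m with hk
      -- brackets of bitLength: 2^(k-1) ≤ m < 2^k
      have hlt : m.natAbs < 2 ^ k := PySem.Int.lt_two_pow_bitLength m
      have hge : 2 ^ (k - 1) ≤ m.natAbs := PySem.Int.two_pow_bitLength_le m (by omega)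
      have habs : (m.natAbs : Int) = m := Int.natAbs_of_nonneg (by omega)
      have hk1 : 1 ≤ k := by
        by_contra h
        have : k = 0 := by omega
        rw [this] at hlt
        omega
      have hltI : m < (2 : Int) ^ k := by
        rw [← habs]; exact_mod_cast hlt
      have hgeI : (2 : Int) ^ (k - 1) ≤ m := by
        rw [← habs]; exact_mod_cast hge
      -- k satisfies the loop's exit condition and is minimal
      have hkex : num ≤ t * 2 ^ k := by
        have : q ≤ 2 ^ k := by omega
        nlinarith [hbr.2]
      have hkmin : ∀ i, i < k → t * 2 ^ i < num := by
        intro i hi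
        have hle2 : (2 : Int) ^ i ≤ 2 ^ (k - 1) := by
          apply pow_le_pow_right₀ (by norm_num)
          omega
        have : (2 : Int) ^ i ≤ m := le_trans hle2 hgeI
        nlinarith [hbr.1]
      have hfuel : k ≤ 0 + (num.toNat + 1) := by
        -- num ≤ t·2^(k-1) fails, so 2^(k-1) < num, hence k - 1 < num
        have h1 : t * 2 ^ (k - 1) < num := hkmin (k - 1) (by omega)
        have h2 : (2 : Int) ^ (k - 1) < num := by nlinarith [pow_pos (by norm_num : (0:Int) < 2) (k - 1)]
        have h3 : ((k - 1 : Nat) : Int) < 2 ^ (k - 1) := by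
          exact_mod_cast Nat.lt_two_pow_self
        omega
      have hA : ada_sampling l t = 2 ^ k := by
        have := adaLoop_eq_pow num t k hkex hkmin (num.toNat + 1) 0 (by omega) hfuel
        simpa [ada_sampling, hnum.symm] using this
      rw [hA]
      simp [ada_sampling_alt, hnum.symm, not_le.mpr hle, ← hq, ← hm, ← hk]
  · -- empty list, threshold ≥ 0
    subst hl
    have : ¬ t * 1 < (0 : Int) := by omega
    simp [ada_sampling, ada_sampling_alt, adaLoop, ht0]

-- ===== VERDICT (by name: the statement is the Claim_ definition above) =====
theorem ada_sampling_spec : Claim_equal_ada_sampling := by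
  intro l t _ hpre
  exact ada_sampling_spec' l t hpre
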